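-- pv_equiv track=rewrite | github.com/ooooo-youwillsee/wechat-data-structures-and-algorithms | 37/main.py | isFullNum
-- ===== SOURCE A (Python) =====
-- def isFullNum(n):
--     s = sorted(str(n))
--     if '0' in s:
--         return False
--     for i in range(0, len(s)):
--         if i != int(s[i]) - 1:
--             return False
--     return True
-- ===== SOURCE B (Python) =====
-- def isFullNum(n):
--     s = str(n)
--     if '0' in s:
--         return False
--     k = len(s)
--     seen = set()
--     for c in s:
--         d = int(c)
--         if d > k or d in seen:
--             return False
--         seen.add(d)
--     return True
-- ===== Notes on version B (the rewrite author's own statement) =====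
-- stated objective: simpler
-- what changed: B drops the sort entirely: instead of sorting the digit string and comparing each sorted position against the consecutive expected digit, it makes one left-to-right pass over the original string with a seen-set, rejecting a digit that exceeds the length or repeats.
import Mathlib
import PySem

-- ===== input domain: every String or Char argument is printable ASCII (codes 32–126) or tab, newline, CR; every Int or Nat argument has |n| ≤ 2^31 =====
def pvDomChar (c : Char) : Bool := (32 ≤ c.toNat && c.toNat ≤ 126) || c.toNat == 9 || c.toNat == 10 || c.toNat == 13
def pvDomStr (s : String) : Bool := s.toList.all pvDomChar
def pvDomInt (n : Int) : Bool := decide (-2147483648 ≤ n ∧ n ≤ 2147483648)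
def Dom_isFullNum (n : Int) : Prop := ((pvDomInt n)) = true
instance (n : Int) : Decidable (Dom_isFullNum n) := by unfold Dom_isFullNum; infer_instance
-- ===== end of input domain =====

-- B replaces A's sort-then-positional-compare with a single seen-set pass over the digits; return values agree on Pre_.

-- ===== PORT A =====
-- the for-loop over range(0, len(s)): int(s[i]) raises ValueError on '-' (excluded by Pre_), hence the getD defaults are never hit under Pre_
def pvAChecks (s : List Char) : List Int → Bool
  | [] => true
  | i :: rest =>
      let d := (PySem.Int.ofChars? [(PySem.List.pyGet? s i).getD ' ']).getD 0
      if i ≠ d - 1 then false else pvAChecks s rest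

def isFullNum (n : Int) : Bool :=
  let s := PySem.List.sorted (PySem.Int.toChars n) (fun c => c) false
  if s.contains '0' then false
  else pvAChecks s (PySem.List.pyRange 0 (s.length : Int) 1)

-- ===== PORT B =====
-- int(c) raises ValueError on '-' (excluded by Pre_), hence the getD default is never hit under Pre_
def pvBLoop (k : Int) : PySem.Set Int → List Char → Bool
  | _, [] => true
  | seen, c :: rest =>
      let d := (PySem.Int.ofChars? [c]).getD 0
      if d > k || PySem.Set.contains seen d then false
      else pvBLoop k (PySem.Set.add seen d) rest

def isFullNum_alt (n : Int) : Bool :=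
  let s := PySem.Int.toChars n
  if s.contains '0' then false
  else pvBLoop (s.length : Int) PySem.Set.empty s

-- ===== PRECONDITION & SPEC =====
-- Pre_ excludes exactly the inputs where both Pythons raise ValueError: negative n whose digits
-- contain no zero digit (int of the minus sign is reached); negatives with a zero digit return False in both and stay inside.
def Pre_isFullNum (n : Int) : Prop := 0 ≤ n ∨ '0' ∈ PySem.Int.toChars n
instance (n : Int) : Decidable (Pre_isFullNum n) := by unfold Pre_isFullNum; infer_instance

def pvWitness_isFullNum : Int := 123

def Spec_isFullNum (n : Int) (out : Bool) : Prop := out = isFullNum_alt n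
instance (n : Int) (out : Bool) : Decidable (Spec_isFullNum n out) := by unfold Spec_isFullNum; infer_instance

-- ===== CLAIM (what is proved, stated in full; the proofs are below) =====
def Claim_equal_isFullNum : Prop := ∀ (n : Int), Dom_isFullNum n → Pre_isFullNum n → Spec_isFullNum n (isFullNum n)

-- ===== LEMMAS AND PROOFS =====

def pvDigits : List Char := ['0','1','2','3','4','5','6','7','8','9']

def pvCval (c : Char) : Int := (c.toNat : Int) - 48

theorem pv_digitChar_mem {m : Nat} (h : m < 10) : Nat.digitChar m ∈ pvDigits := by
  interval_cases m <;> decide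

theorem pv_toDigitsCore_mem (f : Nat) : ∀ (n : Nat) (l : List Char), ∀ c ∈ Nat.toDigitsCore 10 f n l, c ∈ l ∨ c ∈ pvDigits := by
  induction f with
  | zero => intro n l c hc; exact Or.inl hc
  | succ f ih =>
      intro n l c hc
      have hlt : n % 10 < 10 := Nat.mod_lt _ (by norm_num)
      simp only [Nat.toDigitsCore] at hc
      by_cases h : n / 10 = 0
      · rw [if_pos h] at hc
        rcases List.mem_cons.mp hc with rfl | hl
        · exact Or.inr (pv_digitChar_mem hlt)
        · exact Or.inl hl
      · rw [if_neg h] at hc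
        rcases ih _ _ _ hc with hl | hd
        · rcases List.mem_cons.mp hl with rfl | hl
          · exact Or.inr (pv_digitChar_mem hlt)
          · exact Or.inl hl
        · exact Or.inr hd

theorem pv_toChars_digits {n : Int} (h : 0 ≤ n) : ∀ c ∈ PySem.Int.toChars n, c ∈ pvDigits := by
  intro c hc
  rw [PySem.Int.toChars, if_neg (not_lt.mpr h)] at hc
  rcases pv_toDigitsCore_mem _ _ _ c hc with h' | h'
  · simp at h'
  · exact h'

theorem pv_ofChars_digit {c : Char} (hc : c ∈ pvDigits) :
    (PySem.Int.ofChars? [c]).getD 0 = pvCval c ∧ 0 ≤ pvCval c ∧ pvCval c ≤ 9 := by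
  fin_cases hc <;> decide

theorem pv_cval_le {c c' : Char} (h : c ≤ c') : pvCval c ≤ pvCval c' := by
  have : c.toNat ≤ c'.toNat := by
    rw [Char.le_def] at h; exact UInt32.le_iff_toNat_le.mp h
  unfold pvCval; omega

theorem pv_cval_pos {c : Char} (hc : c ∈ pvDigits) (h0 : c ≠ '0') : 1 ≤ pvCval c := by
  fin_cases hc <;> simp_all <;> decide

-- A's loop returns true iff every index in the list passes its check
set_option maxRecDepth 4000 in
theorem pv_aChecks_iff (s : List Char) (L : List Int) :
    pvAChecks s L = true ↔ ∀ i ∈ L, i = (PySem.Int.ofChars? [(PySem.List.pyGet? s i).getD ' ']).getD 0 - 1 := by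
  induction L with
  | nil => simp [pvAChecks]
  | cons i rest ih =>
      simp only [pvAChecks]
      split_ifs with h
      · exact iff_of_false (by decide) (fun hall => h (hall i (by simp)))
      · rw [ne_eq, not_not] at h
        rw [ih]
        constructor
        · intro hall v hv
          rcases List.mem_cons.mp hv with rfl | hv
          · exact h
          · exact hall v hv
        · intro hall v hv
          exact hall v (List.mem_cons_of_mem _ hv)

-- B's loop returns true iff the digit values are ≤ k, pairwise distinct, and disjoint from seen
theorem pv_bLoop_iff (k : Int) : ∀ (rest : List Char) (seen : PySem.Set Int),
    (∀ c ∈ rest, c ∈ pvDigits) →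
    (pvBLoop k seen rest = true ↔
      ((rest.map pvCval).Nodup ∧ ∀ v ∈ rest.map pvCval, v ≤ k ∧ v ∉ seen)) := by
  intro rest
  induction rest with
  | nil => intro seen _; simp [pvBLoop]
  | cons c cs ih =>
      intro seen hd
      obtain ⟨hval, -, -⟩ := pv_ofChars_digit (hd c (List.mem_cons_self ..))
      have hcs : ∀ c' ∈ cs, c' ∈ pvDigits := fun c' h => hd c' (List.mem_cons_of_mem _ h)
      simp only [pvBLoop, hval, Bool.or_eq_true, decide_eq_true_eq, PySem.Set.contains_iff]
      split_ifs with hcond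
      · simp only [false_iff, not_and]
        intro hnd hall
        have hm := hall (pvCval c) (by simp)
        rcases hcond with h | h
        · exact absurd hm.1 (not_le.mpr h)
        · exact hm.2 h
      · push Not at hcond
        rw [ih _ hcs]
        simp only [List.map_cons, List.nodup_cons, List.mem_cons]
        constructor
        · rintro ⟨hnd, hall⟩
          refine ⟨⟨fun hmem => ?_, hnd⟩, ?_⟩
          · exact ((hall _ hmem).2 (by rw [PySem.Set.mem_add]; exact Or.inr rfl))
          · rintro v (rfl | hv)
            · exact ⟨hcond.1, hcond.2⟩
            · exact ⟨(hall v hv).1, fun hs => (hall v hv).2 (by rw [PySem.Set.mem_add]; exact Or.inl hs)⟩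
        · rintro ⟨⟨hnotin, hnd⟩, hall⟩
          refine ⟨hnd, fun v hv => ⟨(hall v (Or.inr hv)).1, fun hs => ?_⟩⟩
          rcases (PySem.Set.mem_add _ _ _).mp hs with hs | rfl
          · exact (hall v (Or.inr hv)).2 hs
          · exact hnotin hv

theorem pv_main_iff (s : List Char) (hd : ∀ c ∈ s, c ∈ pvDigits) (h0 : '0' ∉ s) :
    (∀ i ∈ PySem.List.pyRange 0 (s.length : Int) 1,
        i = (PySem.Int.ofChars? [(PySem.List.pyGet? (PySem.List.sorted s (fun c => c) false) i).getD ' ']).getD 0 - 1)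
      ↔ ((s.map pvCval).Nodup ∧ ∀ v ∈ s.map pvCval, v ≤ (s.length : Int)) := by
  set t := PySem.List.sorted s (fun c => c) false with ht
  have hperm : t.Perm s := PySem.List.sorted_perm s (fun c => c) false
  have hlen : t.length = s.length := hperm.length_eq
  have hdt : ∀ c ∈ t, c ∈ pvDigits := fun c hc => hd c (hperm.mem_iff.mp hc)
  have hL : (∀ i ∈ PySem.List.pyRange 0 (s.length : Int) 1,
        i = (PySem.Int.ofChars? [(PySem.List.pyGet? t i).getD ' ']).getD 0 - 1)
      ↔ ∀ (j : Nat), (hj : j < t.length) → pvCval (t[j]'hj) = (j : Int) + 1 := by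
    constructor
    · intro h j hj
      have hi := h (j : Int) (by rw [PySem.List.mem_pyRange_one]; omega)
      rw [PySem.List.pyGet?_natCast, List.getElem?_eq_getElem hj, Option.getD_some,
        (pv_ofChars_digit (hdt _ (List.getElem_mem hj))).1] at hi
      omega
    · intro h i hi
      rw [PySem.List.mem_pyRange_one] at hi
      obtain ⟨j, rfl⟩ := Int.eq_ofNat_of_zero_le hi.1
      have hj : j < t.length := by omega
      rw [PySem.List.pyGet?_natCast, List.getElem?_eq_getElem hj, Option.getD_some,
        (pv_ofChars_digit (hdt _ (List.getElem_mem hj))).1, h j hj]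
      omega
  rw [hL]
  have hRlen : (PySem.List.pyRange 1 ((s.length : Int) + 1) 1).length = s.length := by
    rw [PySem.List.length_pyRange_one]; omega
  have hwperm : (t.map pvCval).Perm (s.map pvCval) := hperm.map _
  constructor
  · intro h
    have heq : t.map pvCval = PySem.List.pyRange 1 ((s.length : Int) + 1) 1 := by
      apply List.ext_getElem (by simp [hlen, hRlen])
      intro j h1 h2
      rw [List.getElem_map, h j (by simpa using h1), PySem.List.getElem_pyRange_one]
      omega
    refine ⟨hwperm.nodup_iff.mp (heq ▸ PySem.List.nodup_pyRange_one _ _), ?_⟩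
    intro v hv
    have hvR : v ∈ PySem.List.pyRange 1 ((s.length : Int) + 1) 1 := by
      rw [← heq]; exact hwperm.mem_iff.mpr hv
    rw [PySem.List.mem_pyRange_one] at hvR
    omega
  · rintro ⟨hnd, hle⟩
    have h1le : ∀ v ∈ s.map pvCval, 1 ≤ v := by
      intro v hv
      obtain ⟨c, hc, rfl⟩ := List.mem_map.mp hv
      exact pv_cval_pos (hd c hc) (fun h => h0 (h ▸ hc))
    have hsub : (s.map pvCval) ⊆ PySem.List.pyRange 1 ((s.length : Int) + 1) 1 := by
      intro v hv; rw [PySem.List.mem_pyRange_one]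
      have := hle v hv
      exact ⟨h1le v hv, by omega⟩
    have hperm2 : (s.map pvCval).Perm (PySem.List.pyRange 1 ((s.length : Int) + 1) 1) :=
      (hnd.subperm hsub).perm_of_length_le (by simp [hRlen])
    have hsorted : (t.map pvCval).Pairwise (· ≤ ·) := by
      rw [List.pairwise_map]
      exact (PySem.List.sorted_pairwise s (fun c => c)).imp (fun h => pv_cval_le h)
    have hRsorted : (PySem.List.pyRange 1 ((s.length : Int) + 1) 1).Pairwise (· ≤ ·) :=
      (PySem.List.pairwise_lt_pyRange_one _ _).imp le_of_lt
    have heq : t.map pvCval = PySem.List.pyRange 1 ((s.length : Int) + 1) 1 :=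
      List.Perm.eq_of_pairwise (fun a b _ _ h1 h2 => le_antisymm h1 h2) hsorted hRsorted
        (hwperm.trans hperm2)
    intro j hj
    have hj' : j < (t.map pvCval).length := by simpa using hj
    have hjR : j < (PySem.List.pyRange 1 ((s.length : Int) + 1) 1).length := by
      rw [hRlen, ← hlen]; exact hj
    calc pvCval (t[j]'hj) = (t.map pvCval)[j]'hj' := (List.getElem_map pvCval).symm
      _ = (PySem.List.pyRange 1 ((s.length : Int) + 1) 1)[j]'hjR := List.getElem_of_eq heq hj'
      _ = (j : Int) + 1 := by rw [PySem.List.getElem_pyRange_one]; omega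

theorem pv_main (s : List Char) (hd : ∀ c ∈ s, c ∈ pvDigits) (h0 : '0' ∉ s) :
    pvAChecks (PySem.List.sorted s (fun c => c) false)
        (PySem.List.pyRange 0 (s.length : Int) 1) =
      pvBLoop (s.length : Int) PySem.Set.empty s := by
  have hmain := pv_main_iff s hd h0
  rw [Bool.eq_iff_iff, pv_aChecks_iff, pv_bLoop_iff _ _ _ hd]
  simp only [PySem.Set.empty, List.not_mem_nil, not_false_iff, and_true]
  exact hmain

-- ===== VERDICT (by name: the statement is the Claim_ definition above) =====
theorem isFullNum_spec : Claim_equal_isFullNum := by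
  intro n _ hpre
  unfold Spec_isFullNum isFullNum isFullNum_alt
  by_cases hz : '0' ∈ PySem.Int.toChars n
  · simp [PySem.List.mem_sorted, hz]
  · have hn : 0 ≤ n := hpre.resolve_right hz
    have hd := pv_toChars_digits hn
    simp only [List.contains_iff_mem, PySem.List.mem_sorted, hz, if_false, PySem.List.length_sorted]
    exact pv_main _ hd hz
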